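-- pv_equiv track=rewrite | github.com/RobbeW/Data_Statistiek_R | Deel 3 Algoritmiek/04 Gretige algoritmen/11 Eieren in de microgolf/solution/solution.nl.py | eieren_koken
-- ===== SOURCE A (Python) =====
-- def eieren_koken(max_aantal, max_massa, eieren):
--     aantal = 0
--     massa = 0
--     i = 0
--     while i < len(eieren) and aantal + 1 <= max_aantal and massa + eieren[i] <= max_massa:
--         aantal += 1
--         massa += eieren[i]
--         i += 1
--
--     return aantal
-- ===== SOURCE B (Python) =====
-- def eieren_koken(max_aantal, max_massa, eieren):
--     sums = []
--     total = 0
--     for m in eieren: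
--         total += m
--         sums.append(total)
--     L = next((i for i, s in enumerate(sums) if s > max_massa), len(eieren))
--     return max(0, min(max_aantal, L))
-- ===== Notes on version B (the rewrite author's own statement) =====
-- stated objective: alternative
-- what changed: Replaces the single while loop with combined count/mass conditions by building the prefix-sum table, locating the first cumulative mass exceeding the limit, and clamping with max(0, min(max_aantal, L)).
import Mathlib
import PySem

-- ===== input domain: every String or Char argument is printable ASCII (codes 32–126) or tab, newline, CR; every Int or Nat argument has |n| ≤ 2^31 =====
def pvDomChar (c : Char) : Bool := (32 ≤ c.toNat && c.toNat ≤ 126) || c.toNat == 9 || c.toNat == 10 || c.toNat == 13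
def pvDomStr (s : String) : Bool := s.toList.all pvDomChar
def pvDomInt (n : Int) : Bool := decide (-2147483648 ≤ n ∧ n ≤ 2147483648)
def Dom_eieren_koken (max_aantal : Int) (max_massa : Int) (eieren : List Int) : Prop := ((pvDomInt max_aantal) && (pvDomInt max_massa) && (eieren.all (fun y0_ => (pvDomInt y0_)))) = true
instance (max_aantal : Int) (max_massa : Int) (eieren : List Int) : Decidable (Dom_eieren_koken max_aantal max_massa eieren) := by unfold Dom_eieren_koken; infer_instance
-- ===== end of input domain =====

-- B builds the prefix-sum table, finds the first cumulative mass exceeding the limit, and clamps with max 0 (min max_aantal L); same O(n) cost, different decomposition.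


-- ===== PORT A =====
-- A's while loop over index i with accumulators aantal, massa; recursion on the remaining list.
def eierenLoopA (max_aantal max_massa : Int) : List Int → Int → Int → Int
  | [], aantal, _ => aantal
  | x :: xs, aantal, massa =>
    if aantal + 1 ≤ max_aantal ∧ massa + x ≤ max_massa then
      eierenLoopA max_aantal max_massa xs (aantal + 1) (massa + x)
    else aantal

def eieren_koken (max_aantal : Int) (max_massa : Int) (eieren : List Int) : Int :=
  eierenLoopA max_aantal max_massa eieren 0 0

-- ===== PORT B =====
-- prefix sums of eieren starting from running total t (B's first loop)
def eierenSums : List Int → Int → List Int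
  | [], _ => []
  | x :: xs, t => (t + x) :: eierenSums xs (t + x)

-- index of the first prefix sum exceeding max_massa, or the length if none (B's next(...))
def eierenFirstExceed (max_massa : Int) : List Int → Int
  | [] => 0
  | s :: rest => if s > max_massa then 0 else 1 + eierenFirstExceed max_massa rest

def eieren_koken_alt (max_aantal : Int) (max_massa : Int) (eieren : List Int) : Int :=
  max 0 (min max_aantal (eierenFirstExceed max_massa (eierenSums eieren 0)))

-- ===== PRECONDITION & SPEC =====
def Spec_eieren_koken (max_aantal : Int) (max_massa : Int) (eieren : List Int) (out : Int) : Prop := out = eieren_koken_alt max_aantal max_massa eieren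
instance (max_aantal : Int) (max_massa : Int) (eieren : List Int) (out : Int) : Decidable (Spec_eieren_koken max_aantal max_massa eieren out) := by unfold Spec_eieren_koken; infer_instance

-- ===== CLAIM (what is proved, stated in full; the proofs are below) =====
def Claim_equal_eieren_koken : Prop := ∀ (max_aantal : Int) (max_massa : Int) (eieren : List Int), Dom_eieren_koken max_aantal max_massa eieren → Spec_eieren_koken max_aantal max_massa eieren (eieren_koken max_aantal max_massa eieren)

-- ===== LEMMAS AND PROOFS =====
lemma eierenFirstExceed_nonneg (max_massa : Int) (l : List Int) :
    0 ≤ eierenFirstExceed max_massa l := by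
  induction l with
  | nil => simp [eierenFirstExceed]
  | cons s rest ih =>
    simp only [eierenFirstExceed]
    split_ifs <;> omega

lemma eierenLoopA_eq (max_aantal max_massa : Int) (xs : List Int) :
    ∀ (a m : Int), eierenLoopA max_aantal max_massa xs a m
      = max a (min max_aantal (a + eierenFirstExceed max_massa (eierenSums xs m))) := by
  induction xs with
  | nil =>
    intro a m
    simp only [eierenLoopA, eierenSums, eierenFirstExceed]
    omega
  | cons x xs ih =>
    intro a m
    simp only [eierenLoopA, eierenSums, eierenFirstExceed]
    by_cases h1 : a + 1 ≤ max_aantal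
    · by_cases h2 : m + x ≤ max_massa
      · rw [if_pos ⟨h1, h2⟩, if_neg (by omega), ih]
        have := eierenFirstExceed_nonneg max_massa (eierenSums xs (m + x))
        omega
      · rw [if_neg (by tauto), if_pos (by omega)]
        omega
    · rw [if_neg (by tauto)]
      have := eierenFirstExceed_nonneg max_massa
        (if m + x > max_massa then ([] : List Int) else eierenSums xs (m + x))
      split_ifs <;>
        [omega;
         (have := eierenFirstExceed_nonneg max_massa (eierenSums xs (m + x)); omega)]

-- ===== VERDICT (by name: the statement is the Claim_ definition above) =====
theorem eieren_koken_spec : Claim_equal_eieren_koken := by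
  intro ma mm e _
  unfold Spec_eieren_koken eieren_koken eieren_koken_alt
  rw [eierenLoopA_eq]
  omega
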